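-- pv_equiv track=rewrite | github.com/Fin2413/Rag_Norma | app/processing/segmenter.py | approximate_pages
-- ===== SOURCE A (Python) =====
-- from typing import List, Tuple, Iterable, Optional
--
-- def approximate_pages(
--     pages_meta: List[dict],
--     spans: List[Tuple[int, int]],
-- ) -> List[Tuple[Optional[int], Optional[int]]]:
--
--     if not pages_meta:
--         return [(None, None) for _ in spans]
--
--     # Преврати статистику в кумулятивные границы символов для каждой страницы
--     cutoffs: List[Tuple[nt, int, int]] = []
--     s = 0
--     for p in pages_meta:
--         s2 = s + int(p.get("chars", 0))
--         cutoffs.append((s, s2, int(p.get("page", 0)) or (len(cutoffs) + 1)))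
--         s = s2
--
--     page_ranges: List[Tupe[Optional[int], Optional[int]]] = []
--     for (start, end) in spans:
--         pages_hit = [pg for (a, b, pg) in cutoffs if not (b <= start or a >= end)]
--         if pages_hit:
--             page_ranges.append((min(pages_hit), max(pages_hit)))
--         else:
--             page_ranges.append((None, None))
--     return page_ranges
-- ===== SOURCE B (Python) =====
-- def approximate_pages(pages_meta, spans):
--     # page-major single pass: update per-span running (min,max) accumulators
--     acc = [None] * len(spans)
--     s = 0
--     for i, p in enumerate(pages_meta):
--         s2 = s + int(p.get("chars", 0))
--         pg = int(p.get("page", 0)) or (i + 1)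
--         for j, (start, end) in enumerate(spans):
--             if s < end and s2 > start:
--                 a = acc[j]
--                 acc[j] = (pg, pg) if a is None else (min(a[0], pg), max(a[1], pg))
--         s = s2
--     return [(None, None) if a is None else (a[0], a[1]) for a in acc]
-- ===== Notes on version B (the rewrite author's own statement) =====
-- stated objective: alternative
-- what changed: Replaces A's two phases (build a full cutoff list, then for each span filter it and take min/max of the hit pages) by a page-major single pass that keeps a running (min,max) accumulator per span and never materialises the cutoff or hit lists.
import Mathlib
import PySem

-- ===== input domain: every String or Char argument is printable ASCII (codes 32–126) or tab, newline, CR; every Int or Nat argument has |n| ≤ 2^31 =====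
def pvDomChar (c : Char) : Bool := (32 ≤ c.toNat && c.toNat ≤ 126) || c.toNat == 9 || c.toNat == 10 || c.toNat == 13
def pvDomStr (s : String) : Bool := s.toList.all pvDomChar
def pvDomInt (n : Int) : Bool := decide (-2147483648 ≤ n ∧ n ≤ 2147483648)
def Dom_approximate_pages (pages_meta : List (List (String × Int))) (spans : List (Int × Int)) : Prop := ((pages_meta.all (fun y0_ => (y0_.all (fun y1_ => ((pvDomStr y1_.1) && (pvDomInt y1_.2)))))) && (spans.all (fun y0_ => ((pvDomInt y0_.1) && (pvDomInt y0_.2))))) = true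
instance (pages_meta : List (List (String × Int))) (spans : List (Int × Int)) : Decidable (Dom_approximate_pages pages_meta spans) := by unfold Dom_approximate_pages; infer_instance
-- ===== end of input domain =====

-- B replaces A's span-major filter-then-min/max over a prebuilt cutoff list by a page-major
-- single pass that updates per-span running (min,max) accumulators; alternative, not faster.

-- p.get(k, d) on an association list standing for a Python dict: first match (exact: dict keys are unique in Python; first match is the convention for the list encoding)
def dictGetD (p : List (String × Int)) (k : String) (d : Int) : Int :=
  match p.find? (fun kv => kv.1 == k) with
  | some kv => kv.2
  | none => d

-- ===== PORT A =====
def approximate_pages (pages_meta : List (List (String × Int))) (spans : List (Int × Int)) : List (Option Int × Option Int) :=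
  if pages_meta = [] then
    spans.map (fun _ => ((none : Option Int), (none : Option Int)))
  else
    -- cutoffs built by the first loop (state: cutoffs so far, running char offset s)
    let cutoffs := (pages_meta.foldl (fun (st : List (Int × Int × Int) × Int) p =>
        let s := st.2
        let s2 := s + dictGetD p "chars" 0
        let pg0 := dictGetD p "page" 0
        -- `int(...) or (len(cutoffs)+1)`: 0 is falsy
        (st.1 ++ [(s, s2, if pg0 ≠ 0 then pg0 else ((st.1.length : Int) + 1))], s2)) ([], 0)).1
    spans.map (fun se =>
      let pages_hit := (cutoffs.filter (fun c => !(decide (c.2.1 ≤ se.1) || decide (c.1 ≥ se.2)))).map (fun c => c.2.2)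
      if pages_hit = [] then ((none : Option Int), (none : Option Int))
      else (PySem.List.min? pages_hit (fun x => x), PySem.List.max? pages_hit (fun x => x)))

-- ===== PORT B =====
def approximate_pages_alt (pages_meta : List (List (String × Int))) (spans : List (Int × Int)) : List (Option Int × Option Int) :=
  -- state: (per-span accumulator list acc, running char offset s)
  let st := (PySem.List.enumerate pages_meta).foldl
    (fun (st : List (Option (Int × Int)) × Int) ip =>
      let s := st.2
      let s2 := s + dictGetD ip.2 "chars" 0
      let pg0 := dictGetD ip.2 "page" 0
      let pg := if pg0 ≠ 0 then pg0 else (ip.1 + 1)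
      (List.zipWith (fun a se =>
          if s < se.2 ∧ s2 > se.1 then
            some (match a with
                  | none => (pg, pg)
                  | some m => (min m.1 pg, max m.2 pg))
          else a) st.1 spans, s2))
    (spans.map (fun _ => (none : Option (Int × Int))), 0)
  st.1.map (fun a => match a with
    | none => ((none : Option Int), (none : Option Int))
    | some m => (some m.1, some m.2))

-- ===== PRECONDITION & SPEC =====
def Spec_approximate_pages (pages_meta : List (List (String × Int))) (spans : List (Int × Int)) (out : List (Option Int × Option Int)) : Prop := out = approximate_pages_alt pages_meta spans
instance (pages_meta : List (List (String × Int))) (spans : List (Int × Int)) (out : List (Option Int × Option Int)) : Decidable (Spec_approximate_pages pages_meta spans out) := by unfold Spec_approximate_pages; infer_instance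

-- ===== CLAIM (what is proved, stated in full; the proofs are below) =====
def Claim_equal_approximate_pages : Prop := ∀ (pages_meta : List (List (String × Int))) (spans : List (Int × Int)), Dom_approximate_pages pages_meta spans → Spec_approximate_pages pages_meta spans (approximate_pages pages_meta spans)

-- ===== LEMMAS AND PROOFS =====

-- reference cutoff list: cuts pm s i = the cutoff triples produced starting at offset s with i pages already seen
def cuts : List (List (String × Int)) → Int → Int → List (Int × Int × Int)
  | [], _, _ => []
  | p :: ps, s, i =>
    let s2 := s + dictGetD p "chars" 0
    let pg0 := dictGetD p "page" 0
    (s, s2, if pg0 ≠ 0 then pg0 else (i + 1)) :: cuts ps s2 (i + 1)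

-- per-span single-accumulator step over one cutoff
def upd1 (se : Int × Int) (a : Option (Int × Int)) (c : Int × Int × Int) : Option (Int × Int) :=
  if c.1 < se.2 ∧ c.2.1 > se.1 then
    some (match a with
          | none => (c.2.2, c.2.2)
          | some m => (min m.1 c.2.2, max m.2 c.2.2))
  else a

def hits (se : Int × Int) (C : List (Int × Int × Int)) : List Int :=
  (C.filter (fun c => !(decide (c.2.1 ≤ se.1) || decide (c.1 ≥ se.2)))).map (fun c => c.2.2)

lemma a_cutoffs (pm : List (List (String × Int))) :
    ∀ (acc : List (Int × Int × Int)) (s : Int),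
      pm.foldl (fun (st : List (Int × Int × Int) × Int) p =>
        let s := st.2
        let s2 := s + dictGetD p "chars" 0
        let pg0 := dictGetD p "page" 0
        (st.1 ++ [(s, s2, if pg0 ≠ 0 then pg0 else ((st.1.length : Int) + 1))], s2)) (acc, s)
      = (acc ++ cuts pm s acc.length, s + (pm.map (fun p => dictGetD p "chars" 0)).sum) := by
  induction pm with
  | nil => intro acc s; simp [cuts]
  | cons p ps ih =>
    intro acc s
    simp only [List.foldl_cons, cuts, List.map_cons, List.sum_cons]
    rw [ih]
    simp [List.length_append]
    ring

lemma fold_some (se : Int × Int) (C : List (Int × Int × Int)) :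
    ∀ m : Int × Int, C.foldl (upd1 se) (some m)
      = some ((hits se C).foldl (fun m pg => (min m.1 pg, max m.2 pg)) m) := by
  induction C with
  | nil => intro m; simp [hits]
  | cons c C ih =>
    intro m
    by_cases h : c.1 < se.2 ∧ c.2.1 > se.1
    · have hb : (!(decide (c.2.1 ≤ se.1) || decide (c.1 ≥ se.2))) = true := by
        simp; omega
      simp only [List.foldl_cons, upd1, if_pos h, hits, List.filter_cons, hb]
      rw [ih]
      simp [hits]
    · have hb : (!(decide (c.2.1 ≤ se.1) || decide (c.1 ≥ se.2))) = false := by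
        simp; omega
      simp only [List.foldl_cons, upd1, if_neg h, hits, List.filter_cons, hb]
      rw [ih]
      simp [hits]

lemma pairfold (t : List Int) : ∀ x y : Int,
    t.foldl (fun m pg => (min m.1 pg, max m.2 pg)) (x, y) = (t.foldl min x, t.foldl max y) := by
  induction t with
  | nil => intro x y; simp
  | cons h t ih => intro x y; simp [ih]

lemma fold_none (se : Int × Int) (C : List (Int × Int × Int)) :
    C.foldl (upd1 se) none
      = match hits se C with
        | [] => none
        | h :: t => some (t.foldl min h, t.foldl max h) := by
  induction C with
  | nil => simp [hits]
  | cons c C ih =>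
    by_cases h : c.1 < se.2 ∧ c.2.1 > se.1
    · have hb : (!(decide (c.2.1 ≤ se.1) || decide (c.1 ≥ se.2))) = true := by
        simp; omega
      simp only [List.foldl_cons, upd1, if_pos h, hits, List.filter_cons, hb]
      rw [fold_some]
      simp [hits, pairfold]
    · have hb : (!(decide (c.2.1 ≤ se.1) || decide (c.1 ≥ se.2))) = false := by
        simp; omega
      simp only [List.foldl_cons, upd1, if_neg h, hits, List.filter_cons, hb]
      exact ih

lemma zip_map_self (g : Option (Int × Int) → (Int × Int) → Option (Int × Int))
    (f : (Int × Int) → Option (Int × Int)) (spans : List (Int × Int)) :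
    List.zipWith g (spans.map f) spans = spans.map (fun se => g (f se) se) := by
  induction spans with
  | nil => simp
  | cons a l ihs => simp [ihs]

-- B's fold, transposed: the accumulator list stays the pointwise per-span fold over the cutoffs seen so far
lemma b_transpose (spans : List (Int × Int)) (pm : List (List (String × Int))) :
    ∀ (i s : Int) (f : (Int × Int) → Option (Int × Int)),
      ((PySem.List.enumerate pm i).foldl
        (fun (st : List (Option (Int × Int)) × Int) ip =>
          let s := st.2
          let s2 := s + dictGetD ip.2 "chars" 0
          let pg0 := dictGetD ip.2 "page" 0
          let pg := if pg0 ≠ 0 then pg0 else (ip.1 + 1)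
          (List.zipWith (fun a se =>
              if s < se.2 ∧ s2 > se.1 then
                some (match a with
                      | none => (pg, pg)
                      | some m => (min m.1 pg, max m.2 pg))
              else a) st.1 spans, s2))
        (spans.map f, s)).1
      = spans.map (fun se => (cuts pm s i).foldl (upd1 se) (f se)) := by
  induction pm with
  | nil => intro i s f; simp [PySem.List.enumerate_nil, cuts]
  | cons p ps ih =>
    intro i s f
    rw [PySem.List.enumerate_cons, List.foldl_cons]
    dsimp only
    rw [zip_map_self]
    rw [ih]
    simp [cuts, upd1]

theorem approximate_pages_eq (pages_meta : List (List (String × Int))) (spans : List (Int × Int)) :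
    approximate_pages pages_meta spans = approximate_pages_alt pages_meta spans := by
  unfold approximate_pages approximate_pages_alt
  dsimp only
  rw [b_transpose spans pages_meta 0 0 (fun _ => none)]
  rw [List.map_map]
  by_cases hpm : pages_meta = []
  · subst hpm
    simp [cuts, Function.comp_def, List.map_const']
  · rw [if_neg hpm]
    rw [a_cutoffs pages_meta [] 0]
    apply List.map_congr_left
    intro se _
    simp only [List.nil_append, List.length_nil, Function.comp, fold_none]
    simp only [Nat.cast_zero]
    rw [show ((List.filter (fun c => !(decide (c.2.1 ≤ se.1) || decide (c.1 ≥ se.2))) (cuts pages_meta 0 0)).map (fun c => c.2.2)) = hits se (cuts pages_meta 0 0) from rfl]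
    cases hits se (cuts pages_meta 0 0) with
    | nil => simp
    | cons h t =>
      rw [PySem.List.min?_id_cons, PySem.List.max?_id_cons]
      simp

-- ===== VERDICT (by name: the statement is the Claim_ definition above) =====
theorem approximate_pages_spec : Claim_equal_approximate_pages := by
  intro pm sp _
  exact approximate_pages_eq pm sp
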